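-- pv_equiv track=rewrite | github.com/khanjason/adventofcode-2019 | advent-8.py | compileimage
-- ===== SOURCE A (Python) =====
-- def compileimage(total,wlist,blist,fresh):
--     output=fresh
--     #colours have been switched for clarity
--     for i in range(0,total):
--         if i in wlist:
--             fresh[i]='■'
--         if i in blist:
--             fresh[i]='□'
--     return fresh
-- ===== SOURCE B (Python) =====
-- def compileimage(total, wlist, blist, fresh):
--     # One pass over each index list instead of scanning both lists for every i in range(total).
--     for w in wlist:
--         if 0 <= w < total:
--             fresh[w] = '■'
--     for b in blist:
--         if 0 <= b < total:
--             fresh[b] = '□'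
--     return fresh
-- ===== Notes on version B (the rewrite author's own statement) =====
-- stated objective: faster
-- what changed: Instead of scanning range(0,total) and testing membership of each index in both lists, B iterates over wlist and blist directly, assigning in-range indices; blacks are applied after whites so overlaps resolve identically.
import Mathlib
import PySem

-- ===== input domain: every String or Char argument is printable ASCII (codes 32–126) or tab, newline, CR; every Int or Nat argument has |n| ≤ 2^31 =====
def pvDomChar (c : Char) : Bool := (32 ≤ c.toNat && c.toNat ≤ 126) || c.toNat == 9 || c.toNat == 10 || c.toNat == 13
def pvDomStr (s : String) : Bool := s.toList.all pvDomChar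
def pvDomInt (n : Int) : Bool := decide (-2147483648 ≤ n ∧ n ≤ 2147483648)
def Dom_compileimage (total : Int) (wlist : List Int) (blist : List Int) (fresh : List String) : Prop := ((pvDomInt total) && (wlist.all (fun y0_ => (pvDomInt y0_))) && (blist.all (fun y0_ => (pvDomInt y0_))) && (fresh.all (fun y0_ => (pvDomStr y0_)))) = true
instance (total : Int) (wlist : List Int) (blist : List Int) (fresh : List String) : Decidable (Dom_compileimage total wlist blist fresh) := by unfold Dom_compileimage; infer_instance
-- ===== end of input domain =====

-- B iterates over wlist then blist directly instead of scanning every i in range(0,total);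
-- objective: faster (asymptotic). Both A and B mutate `fresh` in place identically in Python;
-- the equivalence proved here is about the return value.

-- ===== PORT A =====
-- body of A's for-loop: 'if i in wlist: fresh[i]='■'' then 'if i in blist: fresh[i]='□''
-- i comes from range(0,total), so 0 ≤ i and i.toNat is exact (no negative-index wrap).
-- List.set is fresh[i]=… when i < len(fresh); Pre_ excludes the out-of-range writes where Python raises IndexError.
def pvStepA (wlist blist : List Int) (fr : List String) (i : Int) : List String :=
  let fr1 := if i ∈ wlist then fr.set i.toNat "■" else fr
  if i ∈ blist then fr1.set i.toNat "□" else fr1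

def compileimage (total : Int) (wlist : List Int) (blist : List Int) (fresh : List String) : List String :=
  (PySem.List.pyRange 0 total 1).foldl (pvStepA wlist blist) fresh

-- ===== PORT B =====
-- body of each of B's two loops: 'if 0 <= w < total: fresh[w] = c'
def pvPaint (total : Int) (c : String) (fr : List String) (w : Int) : List String :=
  if 0 ≤ w ∧ w < total then fr.set w.toNat c else fr

def compileimage_alt (total : Int) (wlist : List Int) (blist : List Int) (fresh : List String) : List String :=
  blist.foldl (pvPaint total "□") (wlist.foldl (pvPaint total "■") fresh)

-- ===== PRECONDITION & SPEC =====
-- Pre_ excludes exactly the inputs on which Python A raises IndexError: some listed index i with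
-- 0 ≤ i < total but i ≥ len(fresh) (B raises there too).
def Pre_compileimage (total : Int) (wlist : List Int) (blist : List Int) (fresh : List String) : Prop :=
  (∀ w ∈ wlist, 0 ≤ w → w < total → w < (fresh.length : Int)) ∧
  (∀ b ∈ blist, 0 ≤ b → b < total → b < (fresh.length : Int))
instance (total : Int) (wlist : List Int) (blist : List Int) (fresh : List String) : Decidable (Pre_compileimage total wlist blist fresh) := by unfold Pre_compileimage; infer_instance

def pvWitness_compileimage : Int × List Int × List Int × List String := (3, [0, 2], [1, 2], ["x", "y", "z"])

def Spec_compileimage (total : Int) (wlist : List Int) (blist : List Int) (fresh : List String) (out : List String) : Prop := out = compileimage_alt total wlist blist fresh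
instance (total : Int) (wlist : List Int) (blist : List Int) (fresh : List String) (out : List String) : Decidable (Spec_compileimage total wlist blist fresh out) := by unfold Spec_compileimage; infer_instance

-- ===== CLAIM (what is proved, stated in full; the proofs are below) =====
def Claim_equal_compileimage : Prop := ∀ (total : Int) (wlist : List Int) (blist : List Int) (fresh : List String), Dom_compileimage total wlist blist fresh → Pre_compileimage total wlist blist fresh → Spec_compileimage total wlist blist fresh (compileimage total wlist blist fresh)

-- ===== LEMMAS AND PROOFS =====

-- a set never changes whether an entry exists, so a constant map through it is unchanged
theorem pv_set_map_const (l : List String) (n j : Nat) (a c : String) :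
    ((l.set n a)[j]?).map (fun _ => c) = (l[j]?).map (fun _ => c) := by
  rw [List.getElem?_set]
  by_cases h : n = j
  · subst h
    by_cases hl : n < l.length
    · simp [hl]
    · simp [hl]
  · simp [h]

theorem pv_set_get_self (l : List String) (n : Nat) (a : String) :
    (l.set n a)[n]? = (l[n]?).map (fun _ => a) := by
  rw [List.getElem?_set]
  by_cases hl : n < l.length
  · simp [hl]
  · simp [hl]

theorem pv_map_comp_const (o : Option String) (f : String → String) (c : String) :
    Option.map ((fun _ => c) ∘ f) o = Option.map (fun _ => c) o := by
  cases o <;> rfl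

theorem pv_stepA_map_const (w b : List Int) (fr : List String) (i : Int) (j : Nat) (c : String) :
    ((pvStepA w b fr i)[j]?).map (fun _ => c) = (fr[j]?).map (fun _ => c) := by
  unfold pvStepA
  split_ifs <;> simp [pv_set_map_const]

theorem pv_stepA_get_ne (w b : List Int) (fr : List String) (i : Int) (j : Nat)
    (hi : 0 ≤ i) (hne : i ≠ (j : Int)) : (pvStepA w b fr i)[j]? = fr[j]? := by
  have hn : i.toNat ≠ j := by omega
  unfold pvStepA
  split_ifs <;> simp [List.getElem?_set_ne hn]

theorem pv_stepA_get_self (w b : List Int) (fr : List String) (j : Nat) :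
    (pvStepA w b fr (j : Int))[j]? =
      if (j : Int) ∈ w ∨ (j : Int) ∈ b then
        (fr[j]?).map (fun _ => if (j : Int) ∈ b then "□" else "■")
      else fr[j]? := by
  unfold pvStepA
  have ht : ((j : Int)).toNat = j := Int.toNat_natCast j
  by_cases hw : (j : Int) ∈ w <;> by_cases hb : (j : Int) ∈ b <;>
    simp [hw, hb, ht, pv_set_get_self]

theorem pv_foldA_get (w b : List Int) (L : List Int) (fr : List String) (j : Nat)
    (hL : ∀ i ∈ L, 0 ≤ i) :
    (L.foldl (pvStepA w b) fr)[j]? =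
      if (j : Int) ∈ L ∧ ((j : Int) ∈ w ∨ (j : Int) ∈ b) then
        (fr[j]?).map (fun _ => if (j : Int) ∈ b then "□" else "■")
      else fr[j]? := by
  induction L generalizing fr with
  | nil => simp
  | cons i L ih =>
    simp only [List.foldl_cons]
    rw [ih _ (fun x hx => hL x (List.mem_cons_of_mem _ hx))]
    by_cases hij : i = (j : Int)
    · subst hij
      by_cases hm : (j : Int) ∈ w ∨ (j : Int) ∈ b
      · by_cases hLm : (j : Int) ∈ L
        · simp [hm, hLm, pv_stepA_map_const]
        · simp [hm, hLm, pv_stepA_get_self]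
      · have hs : pvStepA w b fr (j : Int) = fr := by
          unfold pvStepA
          have hw' : ¬ (j : Int) ∈ w := fun h => hm (Or.inl h)
          have hb' : ¬ (j : Int) ∈ b := fun h => hm (Or.inr h)
          simp [hw', hb']
        simp [hm, hs]
    · have hji : ¬ (j : Int) = i := fun h => hij h.symm
      rw [pv_stepA_get_ne w b fr i j (hL i (List.mem_cons_self ..)) hij]
      simp [List.mem_cons, hji]

theorem pv_foldPaint_get (total : Int) (c : String) (L : List Int) (fr : List String) (j : Nat) :
    (L.foldl (pvPaint total c) fr)[j]? =
      if (j : Int) ∈ L ∧ (j : Int) < total then (fr[j]?).map (fun _ => c)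
      else fr[j]? := by
  induction L generalizing fr with
  | nil => simp
  | cons i L ih =>
    simp only [List.foldl_cons]
    rw [ih]
    by_cases hij : i = (j : Int)
    · subst hij
      have ht : ((j : Int)).toNat = j := Int.toNat_natCast j
      have h0 : (0 : Int) ≤ (j : Int) := Int.natCast_nonneg j
      by_cases hlt : (j : Int) < total
      · by_cases hLm : (j : Int) ∈ L <;>
          simp [pvPaint, hlt, hLm, ht, h0, pv_set_get_self, pv_map_comp_const]
      · have hs : pvPaint total c fr (j : Int) = fr := by
          unfold pvPaint; simp [hlt]
        simp [hlt, hs]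
    · have hn : (pvPaint total c fr i)[j]? = fr[j]? := by
        unfold pvPaint
        split_ifs with h
        · exact List.getElem?_set_ne (by omega) 
        · rfl
      rw [hn]
      have hji : ¬ (j : Int) = i := fun h => hij h.symm
      simp [List.mem_cons, hji]

-- ===== VERDICT (by name: the statement is the Claim_ definition above) =====
theorem compileimage_spec : Claim_equal_compileimage := by
  intro total wlist blist fresh _dom _pre
  unfold Spec_compileimage compileimage compileimage_alt
  apply List.ext_getElem?
  intro j
  rw [pv_foldA_get wlist blist _ fresh j
        (fun i hi => (PySem.List.mem_pyRange_one.mp hi).1),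
      pv_foldPaint_get, pv_foldPaint_get]
  have h0 : (0 : Int) ≤ (j : Int) := Int.natCast_nonneg j
  by_cases hb : (j : Int) ∈ blist <;> by_cases hw : (j : Int) ∈ wlist <;>
    by_cases ht : (j : Int) < total <;>
    simp [PySem.List.mem_pyRange_one, h0, hb, hw, ht, pv_map_comp_const]
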